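-- pv_equiv track=rewrite | github.com/rasooll/Python-Learning | week7/list.8.py | _max_of_columns_sample_
-- ===== SOURCE A (Python) =====
-- def _max_of_columns_sample_(sample_list):
--     cols = len(sample_list[0])
--     mylist = []
--     for c in range(cols):
--         column_max = 0
--         for row in sample_list:
--             if row[c] > column_max:
--                 column_max = row[c]
--         mylist.append(column_max)
--     return mylist
-- ===== SOURCE B (Python) =====
-- def _max_of_columns_sample_(sample_list):
--     # Single pass over the rows with a running-max accumulator (0 floor kept).
--     acc = [0] * len(sample_list[0])
--     for row in sample_list:
--         acc = [a if a > v else v for a, v in zip(acc, row)]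
--     return acc
-- ===== Notes on version B (the rewrite author's own statement) =====
-- stated objective: alternative
-- what changed: Replaces the column-by-column double scan (one full pass over the matrix per column) with a single pass over the rows that zips each row into a running per-column maximum accumulator.
import Mathlib
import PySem

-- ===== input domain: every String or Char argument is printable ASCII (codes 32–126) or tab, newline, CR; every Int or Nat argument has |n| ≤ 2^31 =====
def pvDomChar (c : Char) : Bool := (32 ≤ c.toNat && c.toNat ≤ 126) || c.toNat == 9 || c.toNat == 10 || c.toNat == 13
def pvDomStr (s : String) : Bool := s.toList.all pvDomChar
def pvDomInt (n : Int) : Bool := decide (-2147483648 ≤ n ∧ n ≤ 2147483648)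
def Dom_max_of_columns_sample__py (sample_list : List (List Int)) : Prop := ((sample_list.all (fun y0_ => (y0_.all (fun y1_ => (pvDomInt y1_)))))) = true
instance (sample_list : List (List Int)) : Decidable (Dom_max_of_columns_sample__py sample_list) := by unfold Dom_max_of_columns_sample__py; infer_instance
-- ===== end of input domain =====

-- B makes one pass over the rows maintaining a running per-column maximum (same cost, different traversal).

-- ===== PORT A =====
-- cols = len(sample_list[0]); per column c, scan all rows keeping the running max (floored at 0), appending each column max.
def max_of_columns_sample__py (sample_list : List (List Int)) : List Int :=
  (PySem.List.pyRange 0 ((PySem.List.pyGetD sample_list 0 []).length : Int) 1).foldl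
    (fun mylist c =>
      mylist ++ [sample_list.foldl
        (fun column_max row =>
          if PySem.List.pyGetD row c 0 > column_max then PySem.List.pyGetD row c 0
          else column_max) 0])
    []

-- ===== PORT B =====
-- One pass over the rows: zip the accumulator with each row, keeping the larger entry pointwise.
def max_of_columns_sample__py_alt (sample_list : List (List Int)) : List Int :=
  sample_list.foldl
    (fun acc row => (acc.zip row).map (fun p => if p.1 > p.2 then p.1 else p.2))
    (List.replicate (PySem.List.pyGetD sample_list 0 []).length (0 : Int))

-- ===== PRECONDITION & SPEC =====
-- Pre_ excludes the empty matrix (A raises IndexError on sample_list[0]) and ragged matrices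
-- in which some row is shorter than the first row (A raises IndexError on row[c]).
def Pre_max_of_columns_sample__py (sample_list : List (List Int)) : Prop :=
  sample_list ≠ [] ∧ ∀ row ∈ sample_list, (sample_list.headD []).length ≤ row.length
instance (sample_list : List (List Int)) : Decidable (Pre_max_of_columns_sample__py sample_list) := by
  unfold Pre_max_of_columns_sample__py; infer_instance
def pvWitness_max_of_columns_sample__py : List (List Int) := [[1, -2], [3, 0]]
def Spec_max_of_columns_sample__py (sample_list : List (List Int)) (out : List Int) : Prop :=
  out = max_of_columns_sample__py_alt sample_list
instance (sample_list : List (List Int)) (out : List Int) : Decidable (Spec_max_of_columns_sample__py sample_list out) := by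
  unfold Spec_max_of_columns_sample__py; infer_instance

-- ===== CLAIM (what is proved, stated in full; the proofs are below) =====
def Claim_equal_max_of_columns_sample__py : Prop := ∀ (sample_list : List (List Int)), Dom_max_of_columns_sample__py sample_list → Pre_max_of_columns_sample__py sample_list → Spec_max_of_columns_sample__py sample_list (max_of_columns_sample__py sample_list)

-- ===== LEMMAS AND PROOFS =====

-- A's outer loop builds the list of column maxima: foldl-append is a map.
theorem pv_foldl_append_map {α β : Type} (f : α → β) :
    ∀ (r : List α) (init : List β),
      r.foldl (fun l c => l ++ [f c]) init = init ++ r.map f := by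
  intro r
  induction r with
  | nil => simp
  | cons x xs ih => intro init; simp [List.foldl, ih]

-- B's invariant: the running accumulator stays the same length and its k-th entry is the
-- column-k max fold, provided every row is at least as long as the accumulator.
theorem pv_altfold_getElem (sl : List (List Int)) :
    ∀ (acc : List Int), (∀ row ∈ sl, acc.length ≤ row.length) →
      (sl.foldl (fun acc row => (acc.zip row).map (fun p => if p.1 > p.2 then p.1 else p.2)) acc).length
        = acc.length ∧
      ∀ (k : Nat) (hk : k < acc.length),
        (sl.foldl (fun acc row => (acc.zip row).map (fun p => if p.1 > p.2 then p.1 else p.2)) acc).getD k 0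
          = sl.foldl
              (fun m row => if PySem.List.pyGetD row (k : Int) 0 > m then PySem.List.pyGetD row (k : Int) 0 else m)
              (acc.getD k 0) := by
  induction sl with
  | nil => intro acc _; exact ⟨rfl, fun k hk => rfl⟩
  | cons row rest ih =>
    intro acc hlen
    have hrow : acc.length ≤ row.length := hlen row (by simp)
    have hlen' : ((acc.zip row).map (fun p : Int × Int => if p.1 > p.2 then p.1 else p.2)).length = acc.length := by
      simp [List.length_zip]; omega
    have hrest : ∀ r ∈ rest, ((acc.zip row).map (fun p : Int × Int => if p.1 > p.2 then p.1 else p.2)).length ≤ r.length := by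
      intro r hr; rw [hlen']; exact hlen r (by simp [hr])
    obtain ⟨ihlen, ihget⟩ := ih _ hrest
    refine ⟨by simpa [hlen'] using ihlen, ?_⟩
    intro k hk
    have hk' : k < ((acc.zip row).map (fun p : Int × Int => if p.1 > p.2 then p.1 else p.2)).length := by omega
    have hstep : ((acc.zip row).map (fun p : Int × Int => if p.1 > p.2 then p.1 else p.2)).getD k 0
        = (if PySem.List.pyGetD row (k : Int) 0 > acc.getD k 0 then PySem.List.pyGetD row (k : Int) 0 else acc.getD k 0) := by
      have hkr : k < row.length := by omega
      have hz : k < (acc.zip row).length := by simp [List.length_zip]; omega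
      rw [List.getD_eq_getElem _ _ hk', List.getElem_map, List.getElem_zip]
      rw [PySem.List.pyGetD_natCast, List.getD_eq_getElem _ _ hkr, List.getD_eq_getElem _ _ hk]
      by_cases h : acc[k] > row[k] <;> simp [h] <;> omega
    rw [List.foldl_cons, ihget k (by omega), hstep, List.foldl_cons]

-- ===== VERDICT (by name: the statement is the Claim_ definition above) =====
theorem max_of_columns_sample__py_spec : Claim_equal_max_of_columns_sample__py := by
  intro sl _ hpre
  obtain ⟨hne, hrows⟩ := hpre
  unfold Spec_max_of_columns_sample__py max_of_columns_sample__py max_of_columns_sample__py_alt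
  obtain ⟨r0, rest, rfl⟩ := List.exists_cons_of_ne_nil hne
  rw [PySem.List.pyGetD_zero_cons]
  set n := r0.length with hn
  have hrows' : ∀ row ∈ (r0 :: rest), n ≤ row.length := by
    intro row hr; exact hrows row hr
  -- A's side: list of per-column folds
  rw [PySem.List.pyRange_one, pv_foldl_append_map]
  obtain ⟨hblen, hbget⟩ := pv_altfold_getElem (r0 :: rest) (List.replicate n (0 : Int))
    (by intro row hr; simpa using hrows' row hr)
  apply List.ext_getElem
  · simp only [List.nil_append, List.length_map, List.length_range, hblen,
      List.length_replicate]
    omega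
  · intro k hk1 hk2
    have hkn : k < n := by
      simp only [List.nil_append, List.length_map, List.length_range] at hk1; omega
    have hB := hbget k (by simpa using hkn)
    rw [List.getD_eq_getElem _ _ hk2] at hB
    have hrep : (List.replicate n (0 : Int)).getD k 0 = 0 := by
      rw [List.getD_eq_getElem _ _ (by simpa using hkn)]; simp
    rw [hrep] at hB
    rw [hB]
    simp only [List.nil_append, List.getElem_map, List.getElem_range, zero_add]
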